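-- pv_equiv track=rewrite | github.com/kathrinmmm/FP-ubb-1 | main.py | finde_laengste_primzahlen_teilfolge
-- ===== SOURCE A (Python) =====
-- def ist_primzahl(zahl):
--     if zahl <= 1:
--         return False
--     if zahl <= 3:
--         return True
--     if zahl % 2 == 0 or zahl % 3 == 0:
--         return False
--     i = 5
--     while i * i <= zahl:
--         if zahl % i == 0 or zahl % (i + 2) == 0:
--             return False
--         i += 6
--     return True
--
-- def finde_laengste_primzahlen_teilfolge(zahlen):
--     aktuelle_teilfolge = []
--     laengste_teilfolge = []
--
--     for zahl in zahlen:
--         if ist_primzahl(zahl):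
--             aktuelle_teilfolge.append(zahl)
--         else:
--             if len(aktuelle_teilfolge) > len(laengste_teilfolge):
--                 laengste_teilfolge = aktuelle_teilfolge
--             aktuelle_teilfolge = []
--
--     if len(aktuelle_teilfolge) > len(laengste_teilfolge):
--         laengste_teilfolge = aktuelle_teilfolge
--
--     return laengste_teilfolge
-- ===== SOURCE B (Python) =====
-- def ist_primzahl(zahl):
--     if zahl <= 1:
--         return False
--     if zahl <= 3:
--         return True
--     if zahl % 2 == 0 or zahl % 3 == 0:
--         return False
--     i = 5
--     while i * i <= zahl:
--         if zahl % i == 0 or zahl % (i + 2) == 0: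
--             return False
--         i += 6
--     return True
--
-- def finde_laengste_primzahlen_teilfolge(zahlen):
--     # One pass over indices keeping only three integers; the answer is a slice.
--     best_start = 0
--     best_len = 0
--     run_len = 0
--     i = 0
--     for zahl in zahlen:
--         if ist_primzahl(zahl):
--             run_len += 1
--             if run_len > best_len:
--                 best_len = run_len
--                 best_start = i + 1 - run_len
--         else:
--             run_len = 0
--         i += 1
--     return zahlen[best_start:best_start + best_len]
-- ===== Notes on version B (the rewrite author's own statement) =====
-- stated objective: alternative
-- what changed: B replaces A's two growing list accumulators (current run / best run, copied around) by a single indexed pass that keeps only three integers (best start, best length, current run length) and returns the answer as one slice of the input at the end.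
import Mathlib
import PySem

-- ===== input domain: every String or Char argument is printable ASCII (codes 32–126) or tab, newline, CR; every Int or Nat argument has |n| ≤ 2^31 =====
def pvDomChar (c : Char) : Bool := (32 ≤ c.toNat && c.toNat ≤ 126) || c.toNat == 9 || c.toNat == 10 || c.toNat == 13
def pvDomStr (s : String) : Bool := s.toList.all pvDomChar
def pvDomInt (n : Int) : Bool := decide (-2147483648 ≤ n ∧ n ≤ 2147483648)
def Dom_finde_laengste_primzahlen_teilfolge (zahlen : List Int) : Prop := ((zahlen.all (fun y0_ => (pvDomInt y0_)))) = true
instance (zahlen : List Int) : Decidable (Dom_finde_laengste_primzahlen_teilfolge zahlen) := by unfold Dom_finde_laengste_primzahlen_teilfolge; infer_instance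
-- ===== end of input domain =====

-- B replaces A's two list accumulators by one indexed pass keeping three integers
-- (best start, best length, current run length) and returns a slice of the input (objective: alternative).

-- ===== PORT A =====
-- shared helper: ist_primzahl is byte-for-byte identical in A and B.
-- The while loop is ported with fuel zahl.toNat; the loop runs only while i*i ≤ zahl with i
-- starting at 5 and stepping by 6, so far fewer than zahl.toNat iterations happen and the
-- fuel-0 branch (returning true) is unreachable on every input reaching the loop.
def ist_primzahl_loop (zahl : Int) : Int → Nat → Bool
  | _, 0 => true
  | i, fuel+1 =>
    if i * i ≤ zahl then
      if PySem.Int.mod zahl i == 0 || PySem.Int.mod zahl (i+2) == 0 then false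
      else ist_primzahl_loop zahl (i+6) fuel
    else true

def ist_primzahl (zahl : Int) : Bool :=
  if zahl ≤ 1 then false
  else if zahl ≤ 3 then true
  else if PySem.Int.mod zahl 2 == 0 || PySem.Int.mod zahl 3 == 0 then false
  else ist_primzahl_loop zahl 5 zahl.toNat

-- loop body of A (state: (aktuelle_teilfolge, laengste_teilfolge))
def stepA (s : List Int × List Int) (zahl : Int) : List Int × List Int :=
  if ist_primzahl zahl then (s.1 ++ [zahl], s.2)
  else ([], if s.1.length > s.2.length then s.1 else s.2)

def finde_laengste_primzahlen_teilfolge (zahlen : List Int) : List Int :=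
  let st := zahlen.foldl stepA ([], [])
  if st.1.length > st.2.length then st.1 else st.2

-- ===== PORT B =====
-- loop body of B (state: (best_start, best_len, run_len, i))
def stepB (s : Int × Int × Int × Int) (zahl : Int) : Int × Int × Int × Int :=
  let (bs, bl, rl, i) := s
  if ist_primzahl zahl then
    let rl' := rl + 1
    if rl' > bl then (i + 1 - rl', rl', rl', i + 1)
    else (bs, bl, rl', i + 1)
  else (bs, bl, 0, i + 1)

def finde_laengste_primzahlen_teilfolge_alt (zahlen : List Int) : List Int :=
  let st := zahlen.foldl stepB (0, 0, 0, 0)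
  PySem.List.slice zahlen (some st.1) (some (st.1 + st.2.1))

-- ===== PRECONDITION & SPEC =====
def Spec_finde_laengste_primzahlen_teilfolge (zahlen : List Int) (out : List Int) : Prop := out = finde_laengste_primzahlen_teilfolge_alt zahlen
instance (zahlen : List Int) (out : List Int) : Decidable (Spec_finde_laengste_primzahlen_teilfolge zahlen out) := by unfold Spec_finde_laengste_primzahlen_teilfolge; infer_instance

-- ===== CLAIM (what is proved, stated in full; the proofs are below) =====
def Claim_equal_finde_laengste_primzahlen_teilfolge : Prop := ∀ (zahlen : List Int), Dom_finde_laengste_primzahlen_teilfolge zahlen → Spec_finde_laengste_primzahlen_teilfolge zahlen (finde_laengste_primzahlen_teilfolge zahlen)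

-- ===== LEMMAS AND PROOFS =====

-- A's choice between the current run and the stored best (= A's trailing if).
def pickA (akt lng : List Int) : List Int := if akt.length > lng.length then akt else lng

lemma length_pickA (a b : List Int) : (pickA a b).length = max a.length b.length := by
  unfold pickA; split <;> omega

-- Main loop invariant, by induction on the unprocessed suffix `rest`.
-- Processed prefix = q ++ akt (akt = current run, a suffix of it); (b, l) is B's best
-- window with l = max of the lengths A tracks, and the window of the full list equals
-- what A would answer if the input stopped here.
lemma loop_inv (rest : List Int) : ∀ (q akt lng : List Int) (b l : Nat),
    PySem.List.slice (q ++ akt ++ rest) (some (b : Int)) (some ((b : Int) + (l : Int))) = pickA akt lng →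
    l = max akt.length lng.length →
    pickA (rest.foldl stepA (akt, lng)).1 (rest.foldl stepA (akt, lng)).2 =
    PySem.List.slice (q ++ akt ++ rest)
      (some ((rest.foldl stepB ((b:Int),(l:Int),(akt.length:Int),((q++akt).length:Int))).1))
      (some ((rest.foldl stepB ((b:Int),(l:Int),(akt.length:Int),((q++akt).length:Int))).1 +
             (rest.foldl stepB ((b:Int),(l:Int),(akt.length:Int),((q++akt).length:Int))).2.1)) := by
  induction rest with
  | nil =>
    intro q akt lng b l hs hl
    simpa using hs.symm
  | cons z rest ih =>
    intro q akt lng b l hs hl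
    have hlist : q ++ akt ++ (z :: rest) = q ++ (akt ++ [z]) ++ rest := by simp
    by_cases hp : ist_primzahl z = true
    · have hstA : stepA (akt, lng) z = (akt ++ [z], lng) := by simp [stepA, hp]
      by_cases hgt : ((akt.length : Int) + 1 > (l : Int))
      · -- current run becomes the new best window
        have hlt : l < akt.length + 1 := by exact_mod_cast hgt
        have hA : akt.length ≤ l := hl ▸ Nat.le_max_left _ _
        have hB : lng.length ≤ l := hl ▸ Nat.le_max_right _ _
        have hstB : stepB ((b:Int),(l:Int),(akt.length:Int),((q++akt).length:Int)) z
            = (((q.length : Nat) : Int), (((akt.length+1 : Nat)) : Int),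
               (((akt ++ [z]).length : Nat) : Int), (((q ++ (akt ++ [z])).length : Nat) : Int)) := by
          simp only [stepB, hp, if_true]
          rw [if_pos hgt]
          simp only [Prod.mk.injEq, List.length_append, List.length_cons, List.length_nil]
          and_intros <;> first | trivial | (push_cast; omega)
        have hpick : pickA (akt ++ [z]) lng = akt ++ [z] := by
          unfold pickA
          rw [if_pos (show (akt ++ [z]).length > lng.length by simp; omega)]
        have hs' : PySem.List.slice (q ++ (akt ++ [z]) ++ rest)
            (some ((q.length : Nat) : Int))
            (some (((q.length : Nat) : Int) + ((akt.length + 1 : Nat) : Int))) = pickA (akt ++ [z]) lng := by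
          rw [hpick]
          have hcast : ((q.length : Nat) : Int) + ((akt.length + 1 : Nat) : Int)
              = ((q.length + (akt.length + 1) : Nat) : Int) := by push_cast; ring
          rw [hcast, PySem.List.slice_natCast]
          rw [List.append_assoc, List.drop_left' rfl]
          exact List.take_left' (by simp)
        have hmax : (akt.length + 1 : Nat) = max (akt ++ [z]).length lng.length := by
          simp only [List.length_append, List.length_cons, List.length_nil]
          omega
        have := ih q (akt ++ [z]) lng q.length (akt.length + 1) hs' hmax
        rw [List.foldl_cons, List.foldl_cons, hstA, hstB, hlist]
        exact this
      · -- run extends but the stored best stays at least as long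
        have hle : akt.length + 1 ≤ l := by
          have h' : ¬ ((l : Int) < (akt.length : Int) + 1) := hgt
          omega
        have hA : akt.length ≤ l := hl ▸ Nat.le_max_left _ _
        have hB : lng.length ≤ l := hl ▸ Nat.le_max_right _ _
        have hlng : akt.length + 1 ≤ lng.length := by
          rcases Nat.le_total akt.length lng.length with h'' | h''
          · omega
          · rw [Nat.max_eq_left h''] at hl; omega
        have hstB : stepB ((b:Int),(l:Int),(akt.length:Int),((q++akt).length:Int)) z
            = (((b : Nat) : Int), ((l : Nat) : Int),
               (((akt ++ [z]).length : Nat) : Int), (((q ++ (akt ++ [z])).length : Nat) : Int)) := by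
          simp only [stepB, hp, if_true]
          rw [if_neg hgt]
          simp only [Prod.mk.injEq, List.length_append, List.length_cons, List.length_nil]
          and_intros <;> trivial
        have hpick : pickA (akt ++ [z]) lng = lng := by
          unfold pickA
          rw [if_neg (show ¬ (akt ++ [z]).length > lng.length by simp; omega)]
        have hpickOld : pickA akt lng = lng := by
          unfold pickA
          rw [if_neg (show ¬ akt.length > lng.length by omega)]
        have hs' : PySem.List.slice (q ++ (akt ++ [z]) ++ rest)
            (some (b : Int)) (some ((b : Int) + (l : Int))) = pickA (akt ++ [z]) lng := by
          rw [hpick, ← hlist, hs, hpickOld]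
        have hmax : l = max (akt ++ [z]).length lng.length := by
          simp only [List.length_append, List.length_cons, List.length_nil]
          rw [Nat.max_eq_right (by omega)]
          omega
        have := ih q (akt ++ [z]) lng b l hs' hmax
        rw [List.foldl_cons, List.foldl_cons, hstA, hstB, hlist]
        exact this
    · -- non-prime: run resets, A folds the run into its best
      have hp' : ist_primzahl z = false := by simpa using hp
      have hstA : stepA (akt, lng) z = ([], pickA akt lng) := by
        simp [stepA, hp', pickA]
      have hstB : stepB ((b:Int),(l:Int),(akt.length:Int),((q++akt).length:Int)) z
          = (((b : Nat) : Int), ((l : Nat) : Int),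
             ((([] : List Int).length : Nat) : Int), ((((q ++ akt ++ [z]) ++ ([] : List Int)).length : Nat) : Int)) := by
        simp only [stepB, hp', Bool.false_eq_true, if_false]
        simp only [Prod.mk.injEq, List.length_append, List.length_cons, List.length_nil]
        and_intros <;> trivial
      have hlist2 : q ++ akt ++ (z :: rest) = (q ++ akt ++ [z]) ++ ([] : List Int) ++ rest := by simp
      have hs' : PySem.List.slice ((q ++ akt ++ [z]) ++ ([] : List Int) ++ rest)
          (some (b : Int)) (some ((b : Int) + (l : Int))) = pickA ([] : List Int) (pickA akt lng) := by
        rw [← hlist2, hs]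
        unfold pickA
        split <;> simp_all
      have hmax : l = max ([] : List Int).length (pickA akt lng).length := by
        rw [length_pickA]
        simpa using hl
      have := ih (q ++ akt ++ [z]) ([] : List Int) (pickA akt lng) b l hs' hmax
      rw [List.foldl_cons, List.foldl_cons, hstA, hstB, hlist2]
      exact this

-- ===== VERDICT (by name: the statement is the Claim_ definition above) =====
theorem finde_laengste_primzahlen_teilfolge_spec : Claim_equal_finde_laengste_primzahlen_teilfolge := by
  intro zahlen _
  unfold Spec_finde_laengste_primzahlen_teilfolge
  have h1 : PySem.List.slice (([] : List Int) ++ ([] : List Int) ++ zahlen)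
      (some ((0 : Nat) : Int)) (some (((0 : Nat) : Int) + ((0 : Nat) : Int))) = pickA [] [] := by
    simpa using (PySem.List.slice_natCast zahlen 0 0)
  have h := loop_inv zahlen [] [] [] 0 0 h1 (by simp)
  simp only [List.nil_append, List.length_nil, Nat.cast_zero] at h
  unfold finde_laengste_primzahlen_teilfolge finde_laengste_primzahlen_teilfolge_alt
  simpa [pickA] using h
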